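-- pv_equiv track=rewrite | github.com/mlane52/pythonteachingcode | Python Fundamentals/P2M3MatthewLane.py | word_mixer
-- ===== SOURCE A (Python) =====
-- def word_mixer(word_list):
--     word_list.sort()
--     new_words = []
--     while len(word_list)>5:
--         new_words.append(word_list.pop(-5))
--         new_words.append(word_list.pop(0))
--         new_words.append(word_list.pop())
--     else:
--         return new_words
-- ===== SOURCE B (Python) =====
-- def word_mixer(word_list):
--     # Same return value as the original; O(n log n): sort once, then a flat
--     # buffer with a front cursor replaces the quadratic pop(-5)/pop(0) shifts.
--     # (The original also pops word_list down in place; this version only sorts it.)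
--     buf = sorted(word_list)
--     f = 0
--     new_words = []
--     while len(buf) - f > 5:
--         e = buf.pop(); d4 = buf.pop(); c = buf.pop(); b = buf.pop(); a = buf.pop()
--         new_words.append(a)
--         new_words.append(buf[f])
--         f += 1
--         new_words.append(e)
--         buf.append(b); buf.append(c); buf.append(d4)
--     return new_words
-- ===== Notes on version B (the rewrite author's own statement) =====
-- stated objective: faster
-- what changed: Replaces repeated pop(-5)/pop(0) on a shrinking list (each an O(n) shift) with a single sorted buffer plus a front cursor and end-only pops/appends, so each loop step is O(1) after the sort.
import Mathlib
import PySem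

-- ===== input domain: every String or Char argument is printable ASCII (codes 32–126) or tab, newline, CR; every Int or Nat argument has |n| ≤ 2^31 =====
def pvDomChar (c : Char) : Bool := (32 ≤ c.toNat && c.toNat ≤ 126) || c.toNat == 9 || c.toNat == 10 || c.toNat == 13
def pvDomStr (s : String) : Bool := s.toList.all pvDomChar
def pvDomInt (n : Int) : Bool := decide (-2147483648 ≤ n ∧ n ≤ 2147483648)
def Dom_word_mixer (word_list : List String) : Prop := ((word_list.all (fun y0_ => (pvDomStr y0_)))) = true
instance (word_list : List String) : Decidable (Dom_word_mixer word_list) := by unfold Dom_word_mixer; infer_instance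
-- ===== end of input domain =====

-- B replaces A's repeated pop(-5)/pop(0) on a shrinking list with a sorted buffer,
-- a front cursor and end-only pops/appends (objective: faster). Equivalence is about
-- the RETURN value only: A also pops the argument list down in place, B only sorts it.

-- ===== PORT A =====
-- while len(word_list)>5: append(pop(-5)); append(pop(0)); append(pop())
def wmALoop (l : List String) (acc : List String) : List String :=
  if 5 < l.length then
    match h1 : PySem.List.pop? l (-5) with
    | none => acc
    | some (a, l1) =>
      match h2 : PySem.List.pop? l1 0 with
      | none => acc
      | some (x, l2) =>
        match h3 : PySem.List.pop? l2 with
        | none => acc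
        | some (e, l3) => wmALoop l3 (acc ++ [a] ++ [x] ++ [e])
  else acc
termination_by l.length
decreasing_by
  have e1 : l1.length + 1 = l.length := PySem.List.length_of_pop?_eq_some _ h1
  have e2 : l2.length + 1 = l1.length := PySem.List.length_of_pop?_eq_some _ h2
  have e3 : l3.length + 1 = l2.length := PySem.List.length_of_pop?_eq_some _ h3
  omega

def word_mixer (word_list : List String) : List String :=
  wmALoop (PySem.List.sorted word_list (fun w => w) false) []

-- ===== PORT B =====
-- buf = sorted(word_list); f = 0; while len(buf)-f > 5: pop the last five
-- (e, d4, c, b, a), emit a, buf[f], e; advance f; append b, c, d4.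
def wmBLoop (buf : List String) (f : Nat) (acc : List String) : List String :=
  if 5 < buf.length - f then
    match h1 : PySem.List.pop? buf with
    | none => acc
    | some (e, buf1) =>
      match h2 : PySem.List.pop? buf1 with
      | none => acc
      | some (d4, buf2) =>
        match h3 : PySem.List.pop? buf2 with
        | none => acc
        | some (c, buf3) =>
          match h4 : PySem.List.pop? buf3 with
          | none => acc
          | some (b, buf4) =>
            match h5 : PySem.List.pop? buf4 with
            | none => acc
            | some (a, buf5) =>
              match PySem.List.pyGet? buf5 (f : Int) with
              | none => acc
              | some x =>
                wmBLoop (buf5 ++ [b] ++ [c] ++ [d4]) (f + 1) (acc ++ [a] ++ [x] ++ [e])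
  else acc
termination_by buf.length - f
decreasing_by
  have e1 : buf1.length + 1 = buf.length := PySem.List.length_of_pop?_eq_some _ h1
  have e2 : buf2.length + 1 = buf1.length := PySem.List.length_of_pop?_eq_some _ h2
  have e3 : buf3.length + 1 = buf2.length := PySem.List.length_of_pop?_eq_some _ h3
  have e4 : buf4.length + 1 = buf3.length := PySem.List.length_of_pop?_eq_some _ h4
  have e5 : buf5.length + 1 = buf4.length := PySem.List.length_of_pop?_eq_some _ h5
  simp only [List.length_append, List.length_cons, List.length_nil]
  omega

def word_mixer_alt (word_list : List String) : List String :=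
  wmBLoop (PySem.List.sorted word_list (fun w => w) false) 0 []

-- ===== PRECONDITION & SPEC =====
def Spec_word_mixer (word_list : List String) (out : List String) : Prop := out = word_mixer_alt word_list
instance (word_list : List String) (out : List String) : Decidable (Spec_word_mixer word_list out) := by unfold Spec_word_mixer; infer_instance

-- ===== CLAIM (what is proved, stated in full; the proofs are below) =====
def Claim_equal_word_mixer : Prop := ∀ (word_list : List String), Dom_word_mixer word_list → Spec_word_mixer word_list (word_mixer word_list)

-- ===== LEMMAS AND PROOFS =====

-- any list of length ≥ 5 splits off its last five elements
theorem wm_last5 {α : Type} (t : List α) (h : 5 ≤ t.length) :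
    ∃ (mid : List α) (a b c d e : α), t = mid ++ [a, b, c, d, e] := by
  induction t with
  | nil => simp at h
  | cons y t ih =>
    by_cases h5 : 5 ≤ t.length
    · obtain ⟨mid, a, b, c, d, e, rfl⟩ := ih h5
      exact ⟨y :: mid, a, b, c, d, e, rfl⟩
    · match t, (by simp at h ⊢; omega : t.length = 4) with
      | [a, b, c, d], _ => exact ⟨[], y, a, b, c, d, rfl⟩

-- any list of length ≥ 6 splits as head, middle, and the last five elements
theorem wm_split {α : Type} (l : List α) (h : 5 < l.length) :
    ∃ (x : α) (mid : List α) (a b c d e : α), l = x :: (mid ++ [a, b, c, d, e]) := by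
  match l, h with
  | y :: t, h =>
    obtain ⟨mid, a, b, c, d, e, rfl⟩ := wm_last5 t (by simp at h; omega)
    exact ⟨y, mid, a, b, c, d, e, rfl⟩

-- Python's pop(-5) on a list of length ≥ 6
theorem wm_popA5 {α : Type} (x a b c d e : α) (mid : List α) :
    PySem.List.pop? (x :: (mid ++ [a, b, c, d, e])) (-5) =
      some (a, x :: (mid ++ [b, c, d, e])) := by
  simp [PySem.List.pop?, PySem.List.pyIdx?]
  rw [List.eraseIdx_append_of_length_le (le_refl _)]
  simp

-- one iteration of A's while-loop on a list of length ≥ 6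
theorem wmALoop_step (x a b c d e : String) (mid acc : List String) :
    wmALoop (x :: (mid ++ [a, b, c, d, e])) acc
      = wmALoop (mid ++ [b, c, d]) (acc ++ [a] ++ [x] ++ [e]) := by
  have ha1 := wm_popA5 x a b c d e mid
  have ha2 : PySem.List.pop? (x :: (mid ++ [b, c, d, e])) 0 = some (x, mid ++ [b, c, d, e]) :=
    PySem.List.pop?_zero_cons _ _
  have ha3 : PySem.List.pop? (mid ++ [b, c, d, e]) = some (e, mid ++ [b, c, d]) := by
    rw [show mid ++ [b, c, d, e] = (mid ++ [b, c, d]) ++ [e] by simp, PySem.List.pop?_last]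
  rw [wmALoop, if_pos (by simp)]
  split
  · simp_all
  · rename_i a1 l1 h1
    rw [ha1] at h1
    injection h1 with h1; injection h1 with h1a h1b
    subst h1a; subst h1b
    split
    · simp_all
    · rename_i x1 l2 h2
      rw [ha2] at h2
      injection h2 with h2; injection h2 with h2a h2b
      subst h2a; subst h2b
      split
      · simp_all
      · rename_i e1 l3 h3
        rw [ha3] at h3
        injection h3 with h3; injection h3 with h3a h3b
        subst h3a; subst h3b
        rfl

-- one iteration of B's while-loop: buf = processed prefix p (of length f) ++ rest
theorem wmBLoop_step (p : List String) (x a b c d e : String) (mid acc : List String)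
    (f : Nat) (hp : p.length = f) :
    wmBLoop (p ++ (x :: (mid ++ [a, b, c, d, e]))) f acc
      = wmBLoop (p ++ (x :: mid) ++ [b] ++ [c] ++ [d]) (f + 1) (acc ++ [a] ++ [x] ++ [e]) := by
  have hb1 : PySem.List.pop? (p ++ (x :: (mid ++ [a, b, c, d, e])))
      = some (e, p ++ (x :: (mid ++ [a, b, c, d]))) := by
    rw [show p ++ (x :: (mid ++ [a, b, c, d, e])) = (p ++ (x :: (mid ++ [a, b, c, d]))) ++ [e] by simp,
      PySem.List.pop?_last]
  have hb2 : PySem.List.pop? (p ++ (x :: (mid ++ [a, b, c, d])))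
      = some (d, p ++ (x :: (mid ++ [a, b, c]))) := by
    rw [show p ++ (x :: (mid ++ [a, b, c, d])) = (p ++ (x :: (mid ++ [a, b, c]))) ++ [d] by simp,
      PySem.List.pop?_last]
  have hb3 : PySem.List.pop? (p ++ (x :: (mid ++ [a, b, c])))
      = some (c, p ++ (x :: (mid ++ [a, b]))) := by
    rw [show p ++ (x :: (mid ++ [a, b, c])) = (p ++ (x :: (mid ++ [a, b]))) ++ [c] by simp,
      PySem.List.pop?_last]
  have hb4 : PySem.List.pop? (p ++ (x :: (mid ++ [a, b])))
      = some (b, p ++ (x :: (mid ++ [a]))) := by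
    rw [show p ++ (x :: (mid ++ [a, b])) = (p ++ (x :: (mid ++ [a]))) ++ [b] by simp,
      PySem.List.pop?_last]
  have hb5 : PySem.List.pop? (p ++ (x :: (mid ++ [a]))) = some (a, p ++ (x :: mid)) := by
    rw [show p ++ (x :: (mid ++ [a])) = (p ++ (x :: mid)) ++ [a] by simp, PySem.List.pop?_last]
  have hbg : PySem.List.pyGet? (p ++ (x :: mid)) (f : Int) = some x := by
    rw [PySem.List.pyGet?_natCast, ← hp, List.getElem?_append_right (le_refl _)]
    simp
  rw [wmBLoop, if_pos (by simp; omega)]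
  split
  · simp_all
  · rename_i e1 b1 h1
    rw [hb1] at h1
    injection h1 with h1; injection h1 with h1a h1b
    subst h1a; subst h1b
    split
    · simp_all
    · rename_i d1 b2 h2
      rw [hb2] at h2
      injection h2 with h2; injection h2 with h2a h2b
      subst h2a; subst h2b
      split
      · simp_all
      · rename_i c1 b3 h3
        rw [hb3] at h3
        injection h3 with h3; injection h3 with h3a h3b
        subst h3a; subst h3b
        split
        · simp_all
        · rename_i b1 b4 h4
          rw [hb4] at h4
          injection h4 with h4; injection h4 with h4a h4b
          subst h4a; subst h4b
          split
          · simp_all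
          · rename_i a1 b5 h5
            rw [hb5] at h5
            injection h5 with h5; injection h5 with h5a h5b
            subst h5a; subst h5b
            rw [hbg]

-- main invariant: A's remaining list is exactly B's buffer past the front cursor
theorem wm_loop_eq (n : Nat) (l buf acc : List String) (f : Nat)
    (hn : l.length ≤ n) (hl : l = buf.drop f) :
    wmALoop l acc = wmBLoop buf f acc := by
  induction n generalizing l buf acc f with
  | zero =>
    have hl0 : l = [] := List.eq_nil_of_length_eq_zero (by omega)
    subst hl0
    have hbf : buf.length - f = 0 := by
      have := congrArg List.length hl; simpa using this.symm
    rw [wmALoop, wmBLoop, if_neg (by simp), if_neg (by omega)]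
  | succ n ih =>
    by_cases hg : 5 < l.length
    · obtain ⟨x, mid, a, b, c, d, e, rfl⟩ := wm_split l hg
      have hf : f < buf.length := by
        by_contra hge
        have : buf.drop f = [] := List.drop_eq_nil_of_le (by omega)
        rw [this] at hl; simp at hl
      have hp : (buf.take f).length = f := by simp; omega
      have hbuf : buf = buf.take f ++ (x :: (mid ++ [a, b, c, d, e])) := by
        conv_lhs => rw [← List.take_append_drop f buf]
        rw [← hl]
      rw [wmALoop_step]
      conv_rhs => rw [hbuf]
      rw [wmBLoop_step _ _ _ _ _ _ _ _ _ _ hp]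
      apply ih
      · simp at hn ⊢; omega
      · rw [show buf.take f ++ (x :: mid) ++ [b] ++ [c] ++ [d]
            = (buf.take f ++ [x]) ++ (mid ++ [b, c, d]) by simp]
        rw [List.drop_left' (by simp; omega)]
    · rw [wmALoop, if_neg hg, wmBLoop, if_neg ?_]
      have := congrArg List.length hl; simp at this; omega

-- ===== VERDICT (by name: the statement is the Claim_ definition above) =====
theorem word_mixer_spec : Claim_equal_word_mixer := by
  intro wl _
  unfold Spec_word_mixer word_mixer word_mixer_alt
  exact wm_loop_eq (PySem.List.sorted wl (fun w => w) false).length _ _ _ 0 le_rfl (by simp)
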